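-- pv_equiv track=rewrite | github.com/DmShums/target-game | target_game.py | get_pure_user_words
-- ===== SOURCE A (Python) =====
-- from typing import List
--
-- def get_pure_user_words(user_words: List[str],
--                         letters: List[str],
--                         words_from_dict: List[str]) -> List[str]:
--     """
--     (list, list, list) -> list
--
--     Checks user words with the rules and returns list of those words
--     that are not in dictionary.
--     Reads the file f. Checks the words with rules and returns a list of words.
--     Rules:
--     1. Words' length must be >= 4
--     2. Word must have middle letter from letters
--     3. There doesn't have to be more same letters in word than in letters argument
--     """
--     # change grid letters to normal
--     bufer_letters = []
--     for i in letters: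
--         bufer_letters.append("".join(i))
--     letters = list("".join(bufer_letters))
--
--     list_of_words = []
--     for i in user_words:
--         if i.find(letters[4]) != -1 and len(i) >= 4:
--             list_of_words.append(i)
--
--     central_letter_list = []
--     for i in list_of_words:
--         for j in list(set(i)):
--             if (j not in letters):
--                 break
--             if (list(i).count(j) > letters.count(j)):
--                 break
--         else:
--             central_letter_list.append(i)
--
--     final_list = []
--     for i in central_letter_list:
--         if i not in words_from_dict:
--             final_list.append(i)
--     return final_list
-- ===== SOURCE B (Python) =====
-- from typing import List
--
-- def _covered(need, pool):
--     """need, pool: sorted lists of 1-char strings; True iff need is a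
--     sub-multiset of pool, decided by a greedy two-pointer merge scan."""
--     i = 0
--     for ch in need:
--         while i < len(pool) and pool[i] < ch:
--             i += 1
--         if i == len(pool) or pool[i] != ch:
--             return False
--         i += 1
--     return True
--
-- def get_pure_user_words(user_words: List[str],
--                         letters: List[str],
--                         words_from_dict: List[str]) -> List[str]:
--     """Sort-and-merge re-implementation: sort the letter pool once; a word
--     passes iff it is long enough, contains the middle letter, is not a
--     dictionary word, and its sorted characters merge into the sorted pool."""
--     chars = "".join("".join(x) for x in letters)
--     mid = chars[4]
--     pool = sorted(chars)
--     banned = set(words_from_dict)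
--     return [w for w in user_words
--             if len(w) >= 4 and mid in w and w not in banned
--             and _covered(sorted(w), pool)]
-- ===== Notes on version B (the rewrite author's own statement) =====
-- stated objective: alternative
-- what changed: Replaces A's three list-building passes and inner distinct-letter break/else scan with repeated letters.count calls by a sort-and-merge algorithm: the letter pool is sorted once and each candidate word's sorted characters are checked against it by a greedy two-pointer merge scan, combined with the length/middle-letter/dictionary filters in a single pass.
-- outside the precondition, e.g. on get_pure_user_words([], [], []): A returns [], B raises IndexError
import Mathlib
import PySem

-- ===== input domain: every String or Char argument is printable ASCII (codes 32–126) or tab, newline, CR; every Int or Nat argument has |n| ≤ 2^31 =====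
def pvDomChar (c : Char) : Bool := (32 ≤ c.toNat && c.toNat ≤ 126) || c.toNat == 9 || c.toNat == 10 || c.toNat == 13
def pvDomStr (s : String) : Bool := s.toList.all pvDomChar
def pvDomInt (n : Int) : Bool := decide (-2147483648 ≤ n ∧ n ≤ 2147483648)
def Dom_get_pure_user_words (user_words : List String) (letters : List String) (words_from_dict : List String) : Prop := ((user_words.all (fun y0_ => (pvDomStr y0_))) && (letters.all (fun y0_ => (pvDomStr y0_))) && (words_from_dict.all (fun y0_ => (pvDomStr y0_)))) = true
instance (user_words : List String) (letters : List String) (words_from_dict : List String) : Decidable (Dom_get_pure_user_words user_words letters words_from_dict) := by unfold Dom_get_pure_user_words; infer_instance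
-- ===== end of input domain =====

-- B replaces A's three passes and inner break/else count scan by a sort-and-merge test:
-- the letter pool is sorted once and each word's sorted characters are matched against it
-- by a two-pointer merge scan (objective: alternative).

-- ===== PORT A =====
-- inner 'for j in list(set(i)): … break / else' loop of A, as a Bool
-- (True = the else branch is reached, i.e. no break; the result is independent of the
-- iteration order of Python's set, so iterating the distinct letters in first-occurrence
-- order — PySem.Set.ofList — is exact)
def pvA_ok : List Char → List Char → List Char → Bool
  | [], _, _ => true
  | j :: rest, letters, w =>
      if letters.contains j = false then false            -- if j not in letters: break
      else if letters.count j < w.count j then false      -- if list(i).count(j) > letters.count(j): break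
      else pvA_ok rest letters w

def get_pure_user_words (user_words : List String) (letters : List String) (words_from_dict : List String) : List String :=
  -- bufer_letters: "".join(i) of a str i is i itself (exact)
  let bufer_letters : List String := letters.foldl (fun acc i => acc ++ [i]) []
  -- letters = list("".join(bufer_letters)), a list of 1-char strings, held as List Char
  let lettersC : List Char := (PySem.Str.join "" bufer_letters).toList
  match PySem.List.pyGet? lettersC 4 with
  | none => []                                            -- letters[4]: IndexError, outside Pre_
  | some mid =>
    let list_of_words : List String := user_words.foldl (fun acc i =>
        if (PySem.Str.find i (String.ofList [mid]) != -1) && decide (4 ≤ PySem.Str.len i)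
        then acc ++ [i] else acc) []
    let central_letter_list : List String := list_of_words.foldl (fun acc i =>
        if pvA_ok (PySem.Set.ofList i.toList) lettersC i.toList then acc ++ [i] else acc) []
    central_letter_list.foldl (fun acc i =>
        if !(words_from_dict.contains i) then acc ++ [i] else acc) []

-- ===== PORT B =====
-- _covered(need, pool): the two-pointer merge scan of Source B; the index i into pool is held
-- as the not-yet-scanned suffix of pool (the while loop advancing i = dropping the head)
def pvCovered : List Char → List Char → Bool
  | [], _ => true
  | _ :: _, [] => false                                   -- i == len(pool): return False
  | ch :: need, p :: pt =>
      if p < ch then pvCovered (ch :: need) pt            -- while pool[i] < ch: i += 1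
      else if p = ch then pvCovered need pt               -- match: i += 1, next ch
      else false                                          -- pool[i] != ch: return False
termination_by need pool => need.length + pool.length

def get_pure_user_words_alt (user_words : List String) (letters : List String) (words_from_dict : List String) : List String :=
  -- chars = "".join("".join(x) for x in letters); "".join(x) of a str x is x itself (exact)
  let chars : List Char := (PySem.Str.join "" letters).toList
  match PySem.List.pyGet? chars 4 with
  | none => []                                            -- chars[4]: IndexError, outside Pre_
  | some mid =>
    -- sorted(chars): 1-char strings compare as their character codes, held as List Char
    let pool : List Char := PySem.List.sorted chars (fun c => c) false
    let banned : PySem.Set String := PySem.Set.ofList words_from_dict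
    user_words.filter (fun w =>
      decide (4 ≤ w.toList.length) && PySem.Str.isIn (String.ofList [mid]) w &&
      !(PySem.Set.contains banned w) &&
      pvCovered (PySem.List.sorted w.toList (fun c => c) false) pool)

-- ===== PRECONDITION & SPEC =====
-- Pre_ excludes the inputs where the joined letters have fewer than 5 characters: there B
-- raises IndexError on chars[4] upfront, and A raises the same IndexError on letters[4] as
-- soon as user_words is non-empty (with user_words empty A never indexes and returns []).
def Pre_get_pure_user_words (user_words : List String) (letters : List String) (words_from_dict : List String) : Prop :=
  5 ≤ ((letters.map String.toList).flatten).length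
instance (user_words : List String) (letters : List String) (words_from_dict : List String) : Decidable (Pre_get_pure_user_words user_words letters words_from_dict) := by unfold Pre_get_pure_user_words; infer_instance

def pvWitness_get_pure_user_words : List String × List String × List String :=
  (["dear", "read", "dare", "xyz"], ["ab", "r", "de", ""], ["read"])

def Spec_get_pure_user_words (user_words : List String) (letters : List String) (words_from_dict : List String) (out : List String) : Prop := out = get_pure_user_words_alt user_words letters words_from_dict
instance (user_words : List String) (letters : List String) (words_from_dict : List String) (out : List String) : Decidable (Spec_get_pure_user_words user_words letters words_from_dict out) := by unfold Spec_get_pure_user_words; infer_instance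

-- ===== CLAIM (what is proved, stated in full; the proofs are below) =====
def Claim_equal_get_pure_user_words : Prop := ∀ (user_words : List String) (letters : List String) (words_from_dict : List String), Dom_get_pure_user_words user_words letters words_from_dict → Pre_get_pure_user_words user_words letters words_from_dict → Spec_get_pure_user_words user_words letters words_from_dict (get_pure_user_words user_words letters words_from_dict)

-- ===== LEMMAS AND PROOFS =====

theorem pv_bufer_eq (letters : List String) :
    letters.foldl (fun acc i => acc ++ [i]) [] = letters := by
  simpa using PySem.List.foldl_append_singleton_eq_map (f := fun i => i) (l := letters) (acc := [])

-- A's inner break/else loop is the 'all counts fit' test, for distinct letters drawn from w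
theorem pv_ok_iff (dl L w : List Char) (hdl : ∀ j ∈ dl, 0 < w.count j) :
    pvA_ok dl L w = dl.all (fun c => decide (w.count c ≤ L.count c)) := by
  induction dl with
  | nil => rfl
  | cons j rest ih =>
    have hj : 0 < w.count j := hdl j (by simp)
    by_cases hc : L.contains j = true
    · have hm : j ∈ L := by simpa using hc
      by_cases hlt : L.count j < w.count j
      · simp [pvA_ok, hlt, Nat.not_le.mpr hlt]
      · simp [pvA_ok, hlt, hm, Nat.le_of_not_lt hlt,
          ih (fun x hx => hdl x (List.mem_cons_of_mem _ hx))]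
    · have hm : j ∉ L := by simpa using hc
      have h0 : L.count j = 0 := List.count_eq_zero.2 hm
      simp [pvA_ok, hm]
      intro hle
      exact absurd (h0 ▸ hle) (Nat.not_le.mpr hj)

-- A's whole per-word test is the sub-multiset relation
theorem pv_ok_iff_subperm (L w : List Char) :
    pvA_ok (PySem.Set.ofList w) L w = true ↔ List.Subperm w L := by
  rw [pv_ok_iff _ _ _ (fun j hj => List.count_pos_iff.2 ((PySem.Set.mem_ofList _ _).1 hj)),
    List.subperm_ext_iff]
  simp [PySem.Set.mem_ofList]

-- B's merge scan decides the sub-multiset relation on sorted lists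
theorem pv_covered_iff_subperm (need pool : List Char)
    (hn : need.Pairwise (· ≤ ·)) (hp : pool.Pairwise (· ≤ ·)) :
    pvCovered need pool = true ↔ List.Subperm need pool := by
  induction need, pool using pvCovered.induct with
  | case1 pool => simp [pvCovered, List.nil_subperm]
  | case2 ch need => simp [pvCovered]
  | case3 ch need p pt hlt ih =>
    have hn' := List.pairwise_cons.mp hn
    rw [pvCovered, if_pos hlt, ih hn (List.Pairwise.of_cons hp)]
    constructor
    · intro h
      exact h.trans (List.sublist_cons_self p pt).subperm
    · intro h
      rw [List.subperm_ext_iff] at h ⊢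
      intro x hx
      have hxp : p ≠ x := by
        intro he
        rw [he] at hlt
        rcases List.mem_cons.mp hx with hx | hx
        · exact lt_irrefl _ (hx ▸ hlt)
        · exact absurd (hn'.1 x hx) (not_le.mpr hlt)
      have hc := h x hx
      simpa [List.count_cons, hxp] using hc
  | case4 need p pt hlt ih =>
    rw [pvCovered, if_neg hlt, if_pos rfl,
      ih (List.Pairwise.of_cons hn) (List.Pairwise.of_cons hp), List.subperm_cons]
  | case5 ch need p pt hlt hne =>
    have hcp : ch < p := lt_of_le_of_ne (not_lt.mp hlt) (Ne.symm hne)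
    simp only [pvCovered, if_neg hlt, if_neg hne, Bool.false_eq_true, false_iff]
    intro h
    rw [List.subperm_ext_iff] at h
    have hc := h ch (by simp)
    have h0 : (p :: pt).count ch = 0 := by
      refine List.count_eq_zero.2 ?_
      intro hmem
      rcases List.mem_cons.mp hmem with hmem | hmem
      · exact absurd (hmem ▸ hcp) (lt_irrefl _)
      · exact absurd ((List.pairwise_cons.mp hp).1 ch hmem) (not_le.mpr hcp)
    rw [h0, List.count_cons_self] at hc
    omega

-- the two per-word tests agree pointwise
theorem pv_pred_eq (mid : Char) (L : List Char) (wd : List String) (w : String) :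
    (!(wd.contains w) &&
      (pvA_ok (PySem.Set.ofList w.toList) L w.toList &&
        ((PySem.Str.find w (String.ofList [mid]) != -1) && decide (4 ≤ PySem.Str.len w))))
    = (decide (4 ≤ w.toList.length) && PySem.Str.isIn (String.ofList [mid]) w &&
        !(PySem.Set.contains (PySem.Set.ofList wd) w) &&
        pvCovered (PySem.List.sorted w.toList (fun c => c) false)
                  (PySem.List.sorted L (fun c => c) false)) := by
  have hfind : (PySem.Str.find w (String.ofList [mid]) != -1)
      = PySem.Str.isIn (String.ofList [mid]) w := by
    by_cases hin : [mid] <:+: w.toList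
    · have h1 : PySem.Chars.find w.toList [mid] ≠ -1 :=
        (PySem.Chars.find_ne_neg_one_iff _ _).2 hin
      have h2 : PySem.Chars.isIn [mid] w.toList = true :=
        (PySem.Chars.isIn_iff_infix _ _).2 hin
      simp [h1, h2]
    · have h1 : PySem.Chars.find w.toList [mid] = -1 :=
        (PySem.Chars.find_eq_neg_one_iff _ _).2 hin
      have h2 : PySem.Chars.isIn [mid] w.toList = false :=
        (PySem.Chars.isIn_eq_false_iff _ _).2 hin
      simp [h1, h2]
  have hmem : wd.contains w = PySem.Set.contains (PySem.Set.ofList wd) w := by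
    rcases h : wd.contains w with _ | _ <;>
      simp_all [PySem.Set.contains_eq_listContains, PySem.Set.mem_ofList]
  have hok : pvA_ok (PySem.Set.ofList w.toList) L w.toList
      = pvCovered (PySem.List.sorted w.toList (fun c => c) false)
                  (PySem.List.sorted L (fun c => c) false) := by
    rw [Bool.eq_iff_iff, pv_ok_iff_subperm,
      pv_covered_iff_subperm _ _
        (by simpa using PySem.List.sorted_pairwise w.toList (fun c => c))
        (by simpa using PySem.List.sorted_pairwise L (fun c => c))]
    exact Iff.symm
      ((PySem.List.sorted_perm w.toList (fun c => c) false).subperm_right.trans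
        ((PySem.List.sorted_perm L (fun c => c) false).subperm_left))
  have hlen : decide (4 ≤ PySem.Str.len w) = decide (4 ≤ w.toList.length) := by
    simp [PySem.Str.len_eq]
  rw [hfind, hmem, hok, hlen]
  cases decide (4 ≤ w.toList.length) <;> cases PySem.Str.isIn (String.ofList [mid]) w <;>
    cases PySem.Set.contains (PySem.Set.ofList wd) w <;>
    cases pvCovered (PySem.List.sorted w.toList (fun c => c) false)
      (PySem.List.sorted L (fun c => c) false) <;> rfl

-- ===== VERDICT (by name: the statement is the Claim_ definition above) =====
theorem get_pure_user_words_spec : Claim_equal_get_pure_user_words := by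
  intro user_words letters words_from_dict _ _
  unfold Spec_get_pure_user_words get_pure_user_words get_pure_user_words_alt
  dsimp only
  rw [pv_bufer_eq]
  cases hmid : PySem.List.pyGet? ((PySem.Str.join "" letters).toList) 4 with
  | none => rfl
  | some mid =>
    simp only [PySem.List.foldl_append_if (f := fun i => i),
      List.map_id_fun', id_eq, List.nil_append, List.filter_filter]
    exact List.filter_congr (fun w _ => pv_pred_eq mid _ words_from_dict w)
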